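-- pv_equiv track=rewrite | github.com/pypi-data/pypi-mirror-296 | packages/kerkle/kerkle-0.0.3.tar.gz/kerkle-0.0.3/src/kerkle/core/helping.py | count_common_prefix
-- ===== SOURCE A (Python) =====
-- def get_bit(index, data):
--     if data[index >> 3] & 1 << (7 - index % 8) > 0:
--         return 1
--     else:
--         return 0
--
-- def count_common_prefix(a, b):
--     count = 0
--     for i in range(0, len(a) * 8):
--         if get_bit(i, a) == get_bit(i, b):
--             count += 1
--         else:
--             return count
--     return count
-- ===== SOURCE B (Python) =====
-- def count_common_prefix(a, b):
--     n = len(a)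
--     for j in range(n):
--         x = (a[j] ^ b[j]) & 0xFF
--         if x:
--             return 8 * j + 8 - x.bit_length()
--     return 8 * n
-- ===== Notes on version B (the rewrite author's own statement) =====
-- stated objective: faster
-- what changed: Bit-by-bit loop with a get_bit helper (8 iterations and two indexed bit extractions per byte) replaced by one byte-wise scan that XORs corresponding bytes and converts the first nonzero XOR to a bit count via bit_length.
import Mathlib
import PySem

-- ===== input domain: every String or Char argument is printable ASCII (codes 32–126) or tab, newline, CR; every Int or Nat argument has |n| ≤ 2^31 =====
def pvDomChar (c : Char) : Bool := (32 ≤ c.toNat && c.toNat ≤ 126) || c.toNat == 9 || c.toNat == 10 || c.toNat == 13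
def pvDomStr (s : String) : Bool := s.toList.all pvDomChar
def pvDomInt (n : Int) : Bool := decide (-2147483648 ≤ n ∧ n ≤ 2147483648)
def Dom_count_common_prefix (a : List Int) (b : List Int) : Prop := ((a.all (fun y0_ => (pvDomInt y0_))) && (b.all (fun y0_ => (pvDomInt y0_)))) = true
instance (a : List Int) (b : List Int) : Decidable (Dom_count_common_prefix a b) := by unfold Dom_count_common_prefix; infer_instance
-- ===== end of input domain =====

-- B replaces A's bit-by-bit loop (helper get_bit called twice per bit) by a byte-wise scan
-- that XORs corresponding bytes and turns the first nonzero XOR into a bit count (faster by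
-- a constant factor, measured).

-- ===== PORT A =====
-- Port of get_bit: Python `data[index >> 3] & 1 << (7 - index % 8) > 0`.
-- `1 << k` is ported as `2 ^ k` (exact).  An out-of-range index is a Python IndexError
-- (pyGet? = none); those inputs are excluded by Pre_, the port returns the default 0 there.
def get_bit (index : Nat) (data : List Int) : Int :=
  if 0 < Int.land ((PySem.List.pyGet? data ((index >>> 3 : Nat) : Int)).getD 0) (2 ^ (7 - index % 8)) then 1 else 0

-- the `for i in range(0, len(a)*8)` loop with early return, as fuel recursion (fuel = remaining iterations)
def cppLoop (a b : List Int) : Nat → Nat → Int → Int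
  | 0, _, count => count
  | rem + 1, i, count =>
    if get_bit i a = get_bit i b then cppLoop a b rem (i + 1) (count + 1) else count

def count_common_prefix (a : List Int) (b : List Int) : Int :=
  cppLoop a b (a.length * 8) 0 0

-- ===== PORT B =====
-- `x.bit_length()` is ported as `Nat.log2 x.toNat + 1` (exact for x > 0; the branch is only
-- taken when x ≠ 0, and x = _ &&& 255 is nonnegative).  b[j] out of range is a Python
-- IndexError (excluded by Pre_); the port takes the default 0 there.
def altLoop (b : List Int) : List Int → Nat → Int
  | [], j => 8 * (j : Int)
  | x :: rest, j =>
    let d := Int.land (Int.xor x ((PySem.List.pyGet? b ((j : Nat) : Int)).getD 0)) 255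
    if d ≠ 0 then 8 * (j : Int) + 8 - ((Nat.log2 d.toNat : Int) + 1)
    else altLoop b rest (j + 1)

def count_common_prefix_alt (a : List Int) (b : List Int) : Int :=
  altLoop b a 0

-- ===== PRECONDITION & SPEC =====
def pvByteDiff (a b : List Int) (j : Nat) : Int :=
  Int.land (Int.xor (a.getD j 0) (b.getD j 0)) 255

-- Pre_ excludes exactly the inputs on which the Python A raises IndexError: b shorter than a
-- while every byte of a up to len(b) agrees with b in its low 8 bits (B raises there too).
def Pre_count_common_prefix (a : List Int) (b : List Int) : Prop :=
  b.length < a.length → ∃ j < b.length, pvByteDiff a b j ≠ 0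
instance (a : List Int) (b : List Int) : Decidable (Pre_count_common_prefix a b) := by
  unfold Pre_count_common_prefix; infer_instance

def pvWitness_count_common_prefix : List Int × List Int := ([255, 1], [255, 3])

def Spec_count_common_prefix (a : List Int) (b : List Int) (out : Int) : Prop := out = count_common_prefix_alt a b
instance (a : List Int) (b : List Int) (out : Int) : Decidable (Spec_count_common_prefix a b out) := by unfold Spec_count_common_prefix; infer_instance

-- ===== CLAIM (what is proved, stated in full; the proofs are below) =====
def Claim_equal_count_common_prefix : Prop := ∀ (a : List Int) (b : List Int), Dom_count_common_prefix a b → Pre_count_common_prefix a b → Spec_count_common_prefix a b (count_common_prefix a b)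

-- ===== LEMMAS AND PROOFS =====

theorem pv_nat_and_two_pow (m k : Nat) : m &&& 2 ^ k = if m.testBit k then 2 ^ k else 0 := by
  apply Nat.eq_of_testBit_eq
  intro j
  rw [Nat.testBit_and]
  by_cases hj : k = j
  · subst hj
    by_cases h : m.testBit k <;> simp [h, Nat.testBit_two_pow_self]
  · by_cases h : m.testBit k <;>
      simp [h, Nat.testBit_two_pow_of_ne hj]

theorem pv_nat_ldiff_two_pow (m k : Nat) :
    Nat.ldiff (2 ^ k) m = if m.testBit k then 0 else 2 ^ k := by
  apply Nat.eq_of_testBit_eq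
  intro j
  rw [Nat.testBit_ldiff]
  by_cases hj : k = j
  · subst hj
    by_cases h : m.testBit k <;> simp [h, Nat.testBit_two_pow_self]
  · by_cases h : m.testBit k <;>
      simp [h, Nat.testBit_two_pow_of_ne hj]

theorem pv_land_two_pow (x : Int) (k : Nat) :
    Int.land x (((2 ^ k : Nat) : Int)) = if x.testBit k then ((2 ^ k : Nat) : Int) else 0 := by
  cases x with
  | ofNat m =>
    show Int.ofNat (m &&& 2 ^ k) = _
    rw [pv_nat_and_two_pow]
    by_cases h : m.testBit k
    · simp only [Int.testBit, h, if_pos]; rfl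
    · simp only [Int.testBit, h, if_neg, Bool.false_eq_true, not_false_iff]; rfl
  | negSucc m =>
    show Int.ofNat (Nat.ldiff (2 ^ k) m) = _
    rw [pv_nat_ldiff_two_pow]
    by_cases h : m.testBit k
    · simp only [Int.testBit, h, Bool.not_true, Bool.false_eq_true, if_neg, not_false_iff]
      rfl
    · simp only [Int.testBit, h, Bool.not_false, if_pos]
      rfl

theorem pv_get_bit_eq (i : Nat) (data : List Int) :
    get_bit i data = if (data.getD (i / 8) 0).testBit (7 - i % 8) then 1 else 0 := by
  unfold get_bit
  have h1 : (i >>> 3) = i / 8 := by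
    rw [Nat.shiftRight_eq_div_pow]
  have hc : ((2 : Int) ^ (7 - i % 8)) = ((2 ^ (7 - i % 8) : Nat) : Int) := by push_cast; ring
  rw [h1, PySem.List.pyGet?_natCast, hc, pv_land_two_pow, List.getD_eq_getElem?_getD]
  by_cases h : (data[i / 8]?.getD 0).testBit (7 - i % 8)
  · simp [h]
  · simp [h]

theorem pv_land255_ofNat (x : Int) : ∃ m : Nat, m < 256 ∧ Int.land x 255 = Int.ofNat m := by
  cases x with
  | ofNat n =>
    refine ⟨n &&& 255, ?_, rfl⟩
    have := Nat.and_le_right (n := n) (m := 255)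
    omega
  | negSucc n =>
    refine ⟨Nat.ldiff 255 n, ?_, rfl⟩
    have h : Nat.ldiff 255 n < 2 ^ 8 := by
      apply Nat.lt_pow_two_of_testBit
      intro j hj
      have h255 : Nat.testBit 255 j = false :=
        Nat.testBit_lt_two_pow (lt_of_lt_of_le (by norm_num)
          (Nat.pow_le_pow_right (by norm_num) hj))
      rw [Nat.testBit_ldiff, h255]
      rfl
    omega

theorem pv_int255_testBit (s : Nat) (h : s < 8) : (255 : Int).testBit s = true := by
  show Nat.testBit 255 s = true
  interval_cases s <;> decide

theorem pv_bit_iff (a b : List Int) (j t : Nat) (ht : t < 8) :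
    (get_bit (8 * j + t) a = get_bit (8 * j + t) b) ↔
      (Int.land (Int.xor (a.getD j 0) (b.getD j 0)) 255).testBit (7 - t) = false := by
  have hdiv : (8 * j + t) / 8 = j := by omega
  have hmod : (8 * j + t) % 8 = t := by omega
  rw [pv_get_bit_eq, pv_get_bit_eq, hdiv, hmod, Int.testBit_land, Int.testBit_lxor,
    pv_int255_testBit _ (by omega)]
  rcases Bool.eq_false_or_eq_true ((a.getD j 0).testBit (7 - t)) with h1 | h1 <;>
    rcases Bool.eq_false_or_eq_true ((b.getD j 0).testBit (7 - t)) with h2 | h2 <;>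
      simp_all

theorem pv_testBit_log2 (m : Nat) (h : 0 < m) : m.testBit m.log2 = true := by
  have h1 : 2 ^ m.log2 ≤ m := Nat.log2_self_le (by omega)
  have h2 : m < 2 ^ (m.log2 + 1) := Nat.lt_log2_self
  rw [Nat.testBit_eq_decide_div_mod_eq]
  have hp : 0 < 2 ^ m.log2 := Nat.two_pow_pos _
  have hq1 : 1 ≤ m / 2 ^ m.log2 := (Nat.le_div_iff_mul_le hp).mpr (by omega)
  have hq2 : m / 2 ^ m.log2 < 2 := by
    rw [Nat.div_lt_iff_lt_mul hp]
    rw [Nat.pow_succ] at h2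
    omega
  have : m / 2 ^ m.log2 = 1 := by omega
  simp [this]

theorem pv_testBit_gt_log2 (m s : Nat) (h : m.log2 < s) : m.testBit s = false := by
  apply Nat.testBit_lt_two_pow
  calc m < 2 ^ (m.log2 + 1) := Nat.lt_log2_self
    _ ≤ 2 ^ s := Nat.pow_le_pow_right (by omega) (by omega)

theorem pv_cpp_stop (a b : List Int) :
    ∀ (t0 rem i : Nat) (count : Int), t0 < rem →
      (∀ t, t < t0 → get_bit (i + t) a = get_bit (i + t) b) →
      get_bit (i + t0) a ≠ get_bit (i + t0) b →
      cppLoop a b rem i count = count + t0 := by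
  intro t0
  induction t0 with
  | zero =>
    intro rem i count hrem heq hne
    obtain ⟨r, rfl⟩ : ∃ r, rem = r + 1 := ⟨rem - 1, by omega⟩
    simp only [cppLoop]
    rw [if_neg (by simpa using hne)]
    simp
  | succ t0 ih =>
    intro rem i count hrem heq hne
    obtain ⟨r, rfl⟩ : ∃ r, rem = r + 1 := ⟨rem - 1, by omega⟩
    simp only [cppLoop]
    rw [if_pos (by simpa using heq 0 (by omega))]
    rw [ih r (i + 1) (count + 1) (by omega)
      (fun t htt => by
        rw [show i + 1 + t = i + (t + 1) by omega]; exact heq (t + 1) (by omega))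
      (by rw [show i + 1 + t0 = i + (t0 + 1) by omega]; exact hne)]
    push_cast
    ring

theorem pv_cpp_pass (a b : List Int) :
    ∀ (s rem i : Nat) (count : Int),
      (∀ t, t < s → get_bit (i + t) a = get_bit (i + t) b) →
      cppLoop a b (rem + s) i count = cppLoop a b rem (i + s) (count + s) := by
  intro s
  induction s with
  | zero => intro rem i count _; simp
  | succ s ih =>
    intro rem i count heq
    have hstep : rem + (s + 1) = (rem + s) + 1 := by omega
    rw [hstep]
    simp only [cppLoop]
    rw [if_pos (by simpa using heq 0 (by omega))]
    rw [ih rem (i + 1) (count + 1)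
      (fun t htt => by
        rw [show i + 1 + t = i + (t + 1) by omega]; exact heq (t + 1) (by omega))]
    congr 1
    · omega
    · push_cast; ring

theorem pv_main (a b : List Int) :
    ∀ (suf : List Int) (j : Nat), a.drop j = suf →
      cppLoop a b (suf.length * 8) (8 * j) (8 * (j : Int)) = altLoop b suf j := by
  intro suf
  induction suf with
  | nil => intro j _; simp [cppLoop, altLoop]
  | cons x rest ih =>
    intro j hdrop
    have h0 : a[j]? = some x := by
      have h' : (a.drop j)[0]? = some x := by rw [hdrop]; rfl
      simpa [List.getElem?_drop] using h'
    have hx : a.getD j 0 = x := by rw [List.getD_eq_getElem?_getD, h0]; rfl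
    have hrest : a.drop (j + 1) = rest := by
      have h' : (a.drop j).tail = rest := by rw [hdrop]; rfl
      rwa [List.tail_drop] at h'
    simp only [altLoop]
    rw [PySem.List.pyGet?_natCast, ← List.getD_eq_getElem?_getD]
    set d := Int.land (Int.xor x (b.getD j 0)) 255 with hd
    obtain ⟨m, hm256, hdm⟩ := pv_land255_ofNat (Int.xor x (b.getD j 0))
    have hdtest : ∀ s, d.testBit s = m.testBit s := by
      intro s; rw [hd, hdm]; rfl
    by_cases hdz : d = 0
    · -- all 8 bits of this byte agree; skip to the next byte
      rw [if_neg (by simpa using hdz)]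
      have hbits : ∀ t, t < 8 → get_bit (8 * j + t) a = get_bit (8 * j + t) b := by
        intro t htt
        rw [pv_bit_iff a b j t htt, hx, ← hd, hdtest]
        have hm0 : m = 0 := by
          have h' : Int.ofNat m = 0 := by rw [← hdm, ← hd, hdz]
          rw [Int.ofNat_eq_natCast] at h'
          omega
        simp [hm0]
      have hlen : (x :: rest).length * 8 = rest.length * 8 + 8 := by simp; omega
      rw [hlen, pv_cpp_pass a b 8 (rest.length * 8) (8 * j) _ hbits]
      have h1 : 8 * j + 8 = 8 * (j + 1) := by omega
      have h2 : 8 * (j : Int) + (8 : Nat) = 8 * ((j + 1 : Nat) : Int) := by push_cast; ring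
      rw [h1, h2, ih (j + 1) hrest]
    · -- first differing bit inside this byte
      rw [if_pos (by simpa using hdz)]
      have hm0 : 0 < m := by
        rcases Nat.eq_zero_or_pos m with h | h
        · exfalso; apply hdz; rw [hd, hdm, h]; rfl
        · exact h
      have hlog : m.log2 < 8 := (Nat.log2_lt (by omega)).mpr (by omega)
      set t0 := 7 - m.log2 with ht0
      have hbits : ∀ t, t < t0 → get_bit (8 * j + t) a = get_bit (8 * j + t) b := by
        intro t htt
        rw [pv_bit_iff a b j t (by omega), hx, ← hd, hdtest]
        exact pv_testBit_gt_log2 m _ (by omega)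
      have hne : get_bit (8 * j + t0) a ≠ get_bit (8 * j + t0) b := by
        rw [Ne, pv_bit_iff a b j t0 (by omega), hx, ← hd, hdtest]
        have h7 : 7 - t0 = m.log2 := by omega
        rw [h7, pv_testBit_log2 m hm0]
        simp
      rw [pv_cpp_stop a b t0 ((x :: rest).length * 8) (8 * j) _ (by simp; omega) hbits hne]
      have hdt : d.toNat = m := by rw [hd, hdm]; rfl
      rw [hdt]
      push_cast [ht0]
      have : (m.log2 : Int) ≤ 7 := by exact_mod_cast Nat.le_of_lt_succ (by omega)
      omega

-- ===== VERDICT (by name: the statement is the Claim_ definition above) =====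
theorem count_common_prefix_spec : Claim_equal_count_common_prefix := by
  intro a b _ _
  unfold Spec_count_common_prefix count_common_prefix count_common_prefix_alt
  have := pv_main a b a 0 (by simp)
  simpa [Nat.mul_comm] using this
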